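-- pv_equiv track=rewrite | github.com/konarkcher/Russian_checkers | board.py | _remove_far
-- ===== SOURCE A (Python) =====
-- def _remove_far(best_moves):
--     new_list = []
--     best_dist = 0
--
--     for move in best_moves:
--         row = move[1] // 10
--
--         if row > best_dist:
--             best_dist = row
--             new_list = [move]
--         elif row == best_dist:
--             new_list.append(move)
--
--     return new_list
-- ===== SOURCE B (Python) =====
-- def _remove_far(best_moves):
--     best_dist = max((move[1] // 10 for move in best_moves), default=0)
--     best_dist = max(best_dist, 0)
--     return [move for move in best_moves if move[1] // 10 == best_dist]
-- ===== Notes on version B (the rewrite author's own statement) =====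
-- stated objective: simpler
-- what changed: Replaces the interleaved scan that resets/appends an accumulator while tracking the best row with a two-pass max-then-filter: compute the target row distance (floored at 0) in one reduction, then filter the list once.
import Mathlib
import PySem

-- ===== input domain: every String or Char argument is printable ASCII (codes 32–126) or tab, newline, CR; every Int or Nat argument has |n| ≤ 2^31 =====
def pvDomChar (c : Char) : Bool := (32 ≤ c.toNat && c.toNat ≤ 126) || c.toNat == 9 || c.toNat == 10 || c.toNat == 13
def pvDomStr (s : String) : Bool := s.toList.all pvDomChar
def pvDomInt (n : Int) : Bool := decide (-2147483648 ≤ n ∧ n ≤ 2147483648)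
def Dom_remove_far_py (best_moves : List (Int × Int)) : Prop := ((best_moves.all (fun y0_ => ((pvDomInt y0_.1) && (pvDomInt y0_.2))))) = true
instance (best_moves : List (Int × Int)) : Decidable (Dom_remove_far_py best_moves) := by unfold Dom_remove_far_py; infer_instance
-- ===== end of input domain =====

-- B replaces A's single interleaved reset/append scan by a two-pass max-then-filter (objective: simpler).

-- ===== PORT A =====
-- the for-loop over best_moves with state (new_list, best_dist)
def removeFarLoopA : List (Int × Int) → List (Int × Int) → Int → List (Int × Int)
  | [], new_list, _ => new_list
  | move :: rest, new_list, best_dist =>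
    let row := PySem.Int.floordiv move.2 10
    if row > best_dist then removeFarLoopA rest [move] row
    else if row = best_dist then removeFarLoopA rest (new_list ++ [move]) best_dist
    else removeFarLoopA rest new_list best_dist

def remove_far_py (best_moves : List (Int × Int)) : List (Int × Int) :=
  removeFarLoopA best_moves [] 0

-- ===== PORT B =====
def remove_far_py_alt (best_moves : List (Int × Int)) : List (Int × Int) :=
  -- max(generator, default=0)
  let best1 : Int :=
    match best_moves.map (fun m => PySem.Int.floordiv m.2 10) with
    | [] => 0
    | r :: rs => rs.foldl max r
  let best_dist := max best1 0
  best_moves.filter (fun m => PySem.Int.floordiv m.2 10 == best_dist)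

-- ===== PRECONDITION & SPEC =====
def Spec_remove_far_py (best_moves : List (Int × Int)) (out : List (Int × Int)) : Prop := out = remove_far_py_alt best_moves
instance (best_moves : List (Int × Int)) (out : List (Int × Int)) : Decidable (Spec_remove_far_py best_moves out) := by unfold Spec_remove_far_py; infer_instance

-- ===== CLAIM (what is proved, stated in full; the proofs are below) =====
def Claim_equal_remove_far_py : Prop := ∀ (best_moves : List (Int × Int)), Dom_remove_far_py best_moves → Spec_remove_far_py best_moves (remove_far_py best_moves)

-- ===== LEMMAS AND PROOFS =====

lemma le_foldl_max (l : List Int) : ∀ d : Int, d ≤ l.foldl max d := by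
  induction l with
  | nil => intro d; simp
  | cons a l ih => intro d; exact le_trans (le_max_left d a) (ih (max d a))

lemma max_foldl_max (l : List Int) : ∀ a b : Int, max b (l.foldl max a) = l.foldl max (max b a) := by
  induction l with
  | nil => intro a b; rfl
  | cons c l ih =>
    intro a b
    simp only [List.foldl_cons]
    rw [ih (max a c) b, max_assoc]

lemma removeFarLoopA_eq (xs : List (Int × Int)) : ∀ (acc : List (Int × Int)) (d : Int),
    removeFarLoopA xs acc d =
      (if (xs.map (fun m => PySem.Int.floordiv m.2 10)).foldl max d = d
       then acc ++ xs.filter (fun m => PySem.Int.floordiv m.2 10 == d)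
       else xs.filter (fun m => PySem.Int.floordiv m.2 10 ==
              (xs.map (fun m => PySem.Int.floordiv m.2 10)).foldl max d)) := by
  induction xs with
  | nil => intro acc d; simp [removeFarLoopA]
  | cons m rest ih =>
    intro acc d
    simp only [removeFarLoopA, List.map_cons, List.foldl_cons]
    set r := PySem.Int.floordiv m.2 10 with hr
    by_cases h1 : r > d
    · rw [if_pos h1, ih [m] r]
      have hm : max d r = r := max_eq_right (le_of_lt h1)
      rw [hm]
      have hd : ¬ ((rest.map (fun m => PySem.Int.floordiv m.2 10)).foldl max r = d) := by
        have := le_foldl_max (rest.map (fun m => PySem.Int.floordiv m.2 10)) r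
        omega
      rw [if_neg hd]
      by_cases h2 : (rest.map (fun m => PySem.Int.floordiv m.2 10)).foldl max r = r
      · rw [if_pos h2, h2, List.filter_cons]
        simp [hr]
      · rw [if_neg h2, List.filter_cons]
        have hne : ¬ (r = (rest.map (fun m => PySem.Int.floordiv m.2 10)).foldl max r) :=
          fun h => h2 h.symm
        simp only [← hr, beq_iff_eq]
        rw [if_neg hne]
    · rw [if_neg h1]
      have hm : max d r = d := max_eq_left (by omega)
      rw [hm]
      by_cases h2 : r = d
      · rw [if_pos h2, ih (acc ++ [m]) d]
        by_cases h3 : (rest.map (fun m => PySem.Int.floordiv m.2 10)).foldl max d = d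
        · rw [if_pos h3, if_pos h3, List.filter_cons]
          have hmq : (PySem.Int.floordiv m.2 10 == d) = true := by rw [← hr, h2]; exact beq_self_eq_true d
          rw [hmq, if_pos rfl, List.append_assoc, List.singleton_append]
        · rw [if_neg h3, if_neg h3, List.filter_cons]
          have hne : ¬ (r = (rest.map (fun m => PySem.Int.floordiv m.2 10)).foldl max d) := by
            have := le_foldl_max (rest.map (fun m => PySem.Int.floordiv m.2 10)) d
            omega
          simp only [← hr, beq_iff_eq]
          rw [if_neg hne]
      · rw [if_neg h2, ih acc d]
        have hlt : r < d := lt_of_le_of_ne (not_lt.mp h1) h2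
        by_cases h3 : (rest.map (fun m => PySem.Int.floordiv m.2 10)).foldl max d = d
        · rw [if_pos h3, if_pos h3, List.filter_cons]
          simp only [← hr, beq_iff_eq]
          rw [if_neg h2]
        · rw [if_neg h3, if_neg h3, List.filter_cons]
          have hne : ¬ (r = (rest.map (fun m => PySem.Int.floordiv m.2 10)).foldl max d) := by
            have := le_foldl_max (rest.map (fun m => PySem.Int.floordiv m.2 10)) d
            omega
          simp only [← hr, beq_iff_eq]
          rw [if_neg hne]

-- ===== VERDICT (by name: the statement is the Claim_ definition above) =====
theorem remove_far_py_spec : Claim_equal_remove_far_py := by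
  intro best_moves _
  unfold Spec_remove_far_py remove_far_py remove_far_py_alt
  rw [removeFarLoopA_eq]
  cases hbm : best_moves with
  | nil => simp
  | cons m rest =>
    simp only [List.map_cons, List.foldl_cons]
    have hb : max ((rest.map (fun m => PySem.Int.floordiv m.2 10)).foldl max (PySem.Int.floordiv m.2 10)) 0
        = (rest.map (fun m => PySem.Int.floordiv m.2 10)).foldl max (max 0 (PySem.Int.floordiv m.2 10)) := by
      rw [max_comm, max_foldl_max]
    rw [hb]
    by_cases h : (rest.map (fun m => PySem.Int.floordiv m.2 10)).foldl max (max 0 (PySem.Int.floordiv m.2 10)) = 0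
    · rw [if_pos h, h]
      simp
    · rw [if_neg h]
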